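-- pv_equiv track=rewrite | github.com/JaylenZhang19/Leetcode | freshPromotion.py | fresh_promotion
-- ===== SOURCE A (Python) =====
-- def fresh_promotion(code, shopping):
--     i, j = 0, 0
--     while i < len(code) and j + len(code[i]) <= len(shopping):
--         flag = True
--         for index, c in enumerate(code[i]):
--             if c != 'anything' and c != shopping[j + index]:
--                 flag = False
--         if flag:
--             j += len(code[i])
--             i += 1
--         else:
--             j += 1
--     return i == len(code)
-- ===== SOURCE B (Python) =====
-- def fresh_promotion(code, shopping):
--     # Greedy per-block scan: for each code block, slide a single pointer j
--     # forward until the block matches shopping[j:j+len(block)] exactly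
--     # (a character can never equal the string 'anything', so A's wildcard
--     # branch is dead and matching is plain substring equality).
--     j = 0
--     for block in code:
--         n = len(block)
--         while True:
--             if j + n > len(shopping):
--                 return False
--             if shopping[j:j + n] == block:
--                 j += n
--                 break
--             j += 1
--     return True
-- ===== Notes on version B (the rewrite author's own statement) =====
-- stated objective: simpler
-- what changed: Replaced the flat two-counter while loop with an inner flag-setting for over enumerate by a per-block for loop with an inner slice-equality scan (the dead 'anything' wildcard test, which can never fire because single characters are compared to a string, is dropped).
import Mathlib
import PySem

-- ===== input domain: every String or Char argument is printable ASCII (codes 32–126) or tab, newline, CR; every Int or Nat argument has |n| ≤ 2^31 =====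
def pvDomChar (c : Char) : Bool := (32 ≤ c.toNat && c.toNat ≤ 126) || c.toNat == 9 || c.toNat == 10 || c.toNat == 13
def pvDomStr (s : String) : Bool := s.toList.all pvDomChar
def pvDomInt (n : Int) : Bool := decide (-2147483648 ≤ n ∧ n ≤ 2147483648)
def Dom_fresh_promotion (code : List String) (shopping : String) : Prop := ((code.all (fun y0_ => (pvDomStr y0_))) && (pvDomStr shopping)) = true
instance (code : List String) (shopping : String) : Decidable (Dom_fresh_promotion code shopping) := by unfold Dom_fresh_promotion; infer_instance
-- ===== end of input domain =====

-- B drops the dead wildcard test ('anything' can never equal a character) and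
-- B drops the dead wildcard test ('anything' can never equal a character) and
-- re-decomposes the flat two-counter loop into a per-block scan; objective: simpler.

-- ===== PORT A =====
-- inner 'for index, c in enumerate(code[i])' setting flag (no early break);
-- shopping[j+index] is provably in range when read (j + len(block) <= len(shopping)),
-- so List.getD is exact there; a character of the string is a 1-char string, ported as
-- String.ofList [c] for the comparison with 'anything'.
def aFlag (block : List Char) (sh : List Char) (j : Nat) : Bool :=
  (PySem.List.enumerate block).foldl
    (fun flag p =>
      if (String.ofList [p.2] != "anything") && (p.2 != sh.getD (j + p.1.toNat) ' ')
      then false else flag) true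

theorem aFlag_nil (sh : List Char) (j : Nat) : aFlag [] sh j = true := rfl

-- the outer while loop over the two counters i, j (code[i] via getElem!: in range
-- whenever read, since the loop condition has i < len(code))
def aLoop (code : List String) (sh : List Char) (i j : Nat) : Bool :=
  if h : i < code.length ∧ j + (code[i]!).toList.length ≤ sh.length then
    if hf : aFlag (code[i]!).toList sh j then
      aLoop code sh (i + 1) (j + (code[i]!).toList.length)
    else
      aLoop code sh i (j + 1)
  else
    i == code.length
termination_by (code.length - i, sh.length - j)
decreasing_by
  · exact Prod.Lex.left _ _ (by omega)
  · refine Prod.Lex.right' _ (by omega) ?_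
    have hne : (code[i]!).toList ≠ [] := by
      intro he
      rw [he, aFlag_nil] at hf
      exact hf rfl
    have hlen : 0 < (code[i]!).toList.length := List.length_pos_iff.mpr hne
    omega

def fresh_promotion (code : List String) (shopping : String) : Bool :=
  aLoop code shopping.toList 0 0

-- ===== PORT B =====
-- inner 'while True' of Source B: slide j until shopping[j:j+n] == block, returning
-- the new pointer, or none for B's 'return False'
def bFind (block : List Char) (sh : List Char) (j : Nat) : Option Nat :=
  if j + block.length > sh.length then none
  else if (sh.drop j).take block.length == block then some (j + block.length)
  else bFind block sh (j + 1)
termination_by sh.length - j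
decreasing_by
  have hne : block ≠ [] := by
    intro he; subst he; simp at *
  have : 0 < block.length := List.length_pos_iff.mpr hne
  omega

-- the 'for block in code' loop of Source B
def bGo (code : List String) (sh : List Char) (j : Nat) : Bool :=
  match code with
  | [] => true
  | b :: rest =>
    match bFind b.toList sh j with
    | none => false
    | some j' => bGo rest sh j'

def fresh_promotion_alt (code : List String) (shopping : String) : Bool :=
  bGo code shopping.toList 0

-- ===== PRECONDITION & SPEC =====
def Spec_fresh_promotion (code : List String) (shopping : String) (out : Bool) : Prop := out = fresh_promotion_alt code shopping
instance (code : List String) (shopping : String) (out : Bool) : Decidable (Spec_fresh_promotion code shopping out) := by unfold Spec_fresh_promotion; infer_instance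

-- ===== CLAIM (what is proved, stated in full; the proofs are below) =====
def Claim_equal_fresh_promotion : Prop := ∀ (code : List String) (shopping : String), Dom_fresh_promotion code shopping → Spec_fresh_promotion code shopping (fresh_promotion code shopping)

-- ===== LEMMAS AND PROOFS =====

-- a character (as a one-character string) is never the string 'anything'
theorem singleton_ne_anything (c : Char) : (String.ofList [c] != "anything") = true := by
  simp only [bne_iff_ne, ne_eq]
  intro h
  have := congrArg String.toList h
  simp at this

-- the flag fold is 'no position triggered the mismatch test'
theorem foldl_flag (P : Int × Char → Bool) (l : List (Int × Char)) (b : Bool) :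
    l.foldl (fun flag p => if P p then false else flag) b = (b && l.all (fun p => !P p)) := by
  induction l generalizing b with
  | nil => simp
  | cons p l ih =>
    simp only [List.foldl_cons, List.all_cons, ih]
    cases hP : P p <;> simp

-- A's flag equals B's slice comparison when the block fits
theorem aFlag_eq (block : List Char) (sh : List Char) (j : Nat)
    (hb : j + block.length ≤ sh.length) :
    aFlag block sh j = ((sh.drop j).take block.length == block) := by
  unfold aFlag
  rw [foldl_flag, Bool.true_and]
  by_cases hceq : (sh.drop j).take block.length = block
  · rw [beq_iff_eq.mpr hceq]
    simp only [List.all_eq_true]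
    intro p hp
    rw [PySem.List.mem_enumerate_iff] at hp
    obtain ⟨k, hk, rfl⟩ := hp
    simp only [singleton_ne_anything, Bool.true_and, Bool.not_eq_eq_eq_not, Bool.not_true,
      bne_eq_false_iff_eq]
    have h2 : ((sh.drop j).take block.length)[k]? = block[k]? := by rw [hceq]
    have hjk : j + k < sh.length := by omega
    rw [List.getElem?_take_of_lt hk, List.getElem?_drop,
        List.getElem?_eq_getElem hjk, List.getElem?_eq_getElem hk] at h2
    simp only [Option.some.injEq] at h2
    rw [← h2]
    simp [List.getD, List.getElem?_eq_getElem hjk]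
  · rw [beq_eq_false_iff_ne.mpr hceq]
    by_contra hall
    simp only [Bool.not_eq_false, List.all_eq_true] at hall
    apply hceq
    apply List.ext_getElem
    · simp; omega
    · intro k h1 h2
      have hk : k < block.length := h2
      have hp : ((k : Int), block[k]) ∈ PySem.List.enumerate block := by
        rw [PySem.List.mem_enumerate_iff]
        exact ⟨k, hk, by simp⟩
      have := hall _ hp
      simp only [singleton_ne_anything, Bool.true_and, Bool.not_eq_eq_eq_not, Bool.not_true,
        bne_eq_false_iff_eq] at this
      simp only [List.getElem_take, List.getElem_drop]
      rw [this]
      have hjk : j + k < sh.length := by omega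
      simp [List.getD, List.getElem?_eq_getElem hjk]

-- the core correspondence between A's flat loop and B's per-block scan
theorem loop_eq (code : List String) (sh : List Char) (i j : Nat) :
    i ≤ code.length → aLoop code sh i j = bGo (code.drop i) sh j := by
  induction i, j using aLoop.induct code sh with
  | case1 i j h hf ih =>
    intro hi
    have hgi : code[i]! = code[i]'h.1 := getElem!_pos code i h.1
    rw [hgi] at ih
    rw [aLoop, dif_pos h, dif_pos hf, hgi, ih (by omega)]
    conv_rhs => rw [List.drop_eq_getElem_cons h.1, bGo, bFind]
    rw [hgi, aFlag_eq _ _ _ (by rw [← hgi]; omega)] at hf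
    rw [if_neg (by rw [← hgi]; omega), if_pos hf]
  | case2 i j h hf ih =>
    intro hi
    have hgi : code[i]! = code[i]'h.1 := getElem!_pos code i h.1
    rw [aLoop, dif_pos h, dif_neg hf, ih hi]
    conv_lhs => rw [List.drop_eq_getElem_cons h.1, bGo]
    conv_rhs => rw [List.drop_eq_getElem_cons h.1, bGo, bFind]
    rw [hgi, aFlag_eq _ _ _ (by rw [← hgi]; omega)] at hf
    rw [if_neg (by rw [← hgi]; omega), if_neg (by simpa using hf)]
  | case3 i j h =>
    intro hi
    rw [aLoop, dif_neg h]
    rcases Nat.lt_or_ge i code.length with hlt | hge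
    · have hgi : code[i]! = code[i]'hlt := getElem!_pos code i hlt
      have hfit : sh.length < j + (code[i]'hlt).toList.length := by
        by_contra hc
        exact h ⟨hlt, by rw [hgi]; omega⟩
      rw [List.drop_eq_getElem_cons hlt, bGo, bFind]
      rw [if_pos (by omega)]
      simp
      omega
    · have : i = code.length := by omega
      subst this
      simp [bGo]

-- ===== VERDICT (by name: the statement is the Claim_ definition above) =====
theorem fresh_promotion_spec : Claim_equal_fresh_promotion := by
  intro code shopping _
  unfold Spec_fresh_promotion fresh_promotion fresh_promotion_alt
  simpa using loop_eq code shopping.toList 0 0 (by omega)
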